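-- pv_equiv track=rewrite | github.com/davghali/apex-trading-system | packages/engine/modules/ksm.py | _next_session
-- ===== SOURCE A (Python) =====
-- from typing import Optional, List, Dict, Any, Tuple
--
-- def _next_session(current_h: int) -> Tuple[str, int]:
--     try:
--         order = [('LONDON_KZ', 2), ('NY_KZ', 7), ('LONDON_CLOSE', 10), ('ASIAN', 20)]
--         for name, start in order:
--             if current_h < start:
--                 return name, (start - current_h) * 60
--         return 'LONDON_KZ', (24 - current_h + 2) * 60
--     except Exception:
--         return 'UNKNOWN', 0
-- ===== SOURCE B (Python) =====
-- from typing import Tuple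
--
-- _SESSIONS = {2: 'LONDON_KZ', 7: 'NY_KZ', 10: 'LONDON_CLOSE', 20: 'ASIAN'}
--
-- def _next_session(current_h: int) -> Tuple[str, int]:
--     # Treat the day as a 24h cycle: lift each session start that is not strictly
--     # ahead of current_h into the next day (s + 24), take the nearest target
--     # hour by a single min over the lifted starts, and read its name off the
--     # start-hour table via target % 24.
--     target = min(s if s > current_h else s + 24 for s in _SESSIONS)
--     return _SESSIONS[target % 24], (target - current_h) * 60
-- ===== Notes on version B (the rewrite author's own statement) =====
-- stated objective: alternative
-- what changed: Replaces A's ordered scan with early return and a separate wrap-around fallback by a cyclic-time computation: each session start not strictly ahead of current_h is lifted into the next day (s+24), a single min over the lifted starts gives the target hour, and the session name is read from a start-hour dict via target % 24, so the wrap case disappears.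
import Mathlib
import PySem

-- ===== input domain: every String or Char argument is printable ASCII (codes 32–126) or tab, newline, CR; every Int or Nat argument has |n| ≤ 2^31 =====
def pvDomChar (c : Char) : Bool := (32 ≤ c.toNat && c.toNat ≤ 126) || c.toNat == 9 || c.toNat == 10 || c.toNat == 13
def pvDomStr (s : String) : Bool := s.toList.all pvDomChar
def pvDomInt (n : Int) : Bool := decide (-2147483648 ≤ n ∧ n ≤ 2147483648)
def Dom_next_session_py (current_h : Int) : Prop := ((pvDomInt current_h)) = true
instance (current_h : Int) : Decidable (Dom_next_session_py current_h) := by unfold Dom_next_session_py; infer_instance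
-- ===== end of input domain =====

-- B recasts A's scan-with-wrap-fallback as a cyclic-time computation: lift past starts by +24,
-- take the minimum target hour, and name it via the start-hour dict at target % 24 (alternative, not faster).

-- ===== PORT A =====
-- literal port of A's loop over order with early return
def nextLoop (current_h : Int) : List (String × Int) → String × Int
  | [] => ("LONDON_KZ", (24 - current_h + 2) * 60)
  | (name, start) :: rest =>
      if current_h < start then (name, (start - current_h) * 60)
      else nextLoop current_h rest

def next_session_py (current_h : Int) : String × Int :=
  nextLoop current_h [("LONDON_KZ", 2), ("NY_KZ", 7), ("LONDON_CLOSE", 10), ("ASIAN", 20)]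

-- ===== PORT B =====
def pvSessions : PySem.Dict Int String :=
  PySem.Dict.ofList [(2, "LONDON_KZ"), (7, "NY_KZ"), (10, "LONDON_CLOSE"), (20, "ASIAN")]

def next_session_py_alt (current_h : Int) : String × Int :=
  let target : Int :=
    (PySem.List.min? (pvSessions.keys.map
      (fun s => if s > current_h then s else s + 24)) (fun x => x)).getD 0
  -- the dict lookup never misses (target % 24 is always a session start); KeyError ported as getD ""
  ((pvSessions.get? (PySem.Int.mod target 24)).getD "", (target - current_h) * 60)

-- ===== PRECONDITION & SPEC =====
def Spec_next_session_py (current_h : Int) (out : String × Int) : Prop := out = next_session_py_alt current_h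
instance (current_h : Int) (out : String × Int) : Decidable (Spec_next_session_py current_h out) := by unfold Spec_next_session_py; infer_instance

-- ===== CLAIM =====
def Claim_equal_next_session_py : Prop := ∀ (current_h : Int), Dom_next_session_py current_h → Spec_next_session_py current_h (next_session_py current_h)

-- ===== LEMMAS AND PROOFS =====
theorem pvKeysS : pvSessions.keys = [2, 7, 10, 20] := by decide
theorem pvGet2 : pvSessions.get? 2 = some "LONDON_KZ" := by decide
theorem pvGet7 : pvSessions.get? 7 = some "NY_KZ" := by decide
theorem pvGet10 : pvSessions.get? 10 = some "LONDON_CLOSE" := by decide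
theorem pvGet20 : pvSessions.get? 20 = some "ASIAN" := by decide
theorem pvMod2 : PySem.Int.mod 2 24 = 2 := by decide
theorem pvMod7 : PySem.Int.mod 7 24 = 7 := by decide
theorem pvMod10 : PySem.Int.mod 10 24 = 10 := by decide
theorem pvMod20 : PySem.Int.mod 20 24 = 20 := by decide
theorem pvMod26 : PySem.Int.mod 26 24 = 2 := by decide

-- ===== VERDICT =====
theorem next_session_py_spec : Claim_equal_next_session_py := by
  intro h _
  unfold Spec_next_session_py next_session_py next_session_py_alt
  by_cases h2 : h < 2
  · simp [nextLoop, h2, show h < 7 from by omega, show h < 10 from by omega,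
      show h < 20 from by omega, pvKeysS, PySem.List.min?, List.foldl, pvMod2, pvGet2]
  · by_cases h7 : h < 7
    · simp [nextLoop, h2, h7, show h < 10 from by omega, show h < 20 from by omega,
        pvKeysS, PySem.List.min?, List.foldl, pvMod7, pvGet7]
    · by_cases h10 : h < 10
      · simp [nextLoop, h2, h7, h10, show h < 20 from by omega,
          pvKeysS, PySem.List.min?, List.foldl, pvMod10, pvGet10]
      · by_cases h20 : h < 20
        · simp [nextLoop, h2, h7, h10, h20,
            pvKeysS, PySem.List.min?, List.foldl, pvMod20, pvGet20]
        · simp [nextLoop, h2, h7, h10, h20,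
            pvKeysS, PySem.List.min?, List.foldl, pvMod26, pvGet2]
          omega
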